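-- pv_equiv track=rewrite | github.com/tyrantlink/plural | api/src/core/version.py | calculate_version
-- ===== SOURCE A (Python) =====
-- BASE_VERSION = '3.0.0' + ('-dev' if True else '')  # ! project.dev_environment
--
-- def calculate_version(
--     commits: dict[str, str]
-- ) -> list[int]:
--     version = list(map(int, BASE_VERSION.split('-')[0].split('.')))
--
--     for message in commits.values():
--         match message.strip().lower()[:6]:
--             case 'major;':
--                 version = [version[0]+1, 0, 0]
--             case 'minor;':
--                 version = [version[0], version[1]+1, 0]
--             case 'patch;' | _:
--                 version[2] += 1
--
--     return version
-- ===== SOURCE B (Python) =====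
-- def calculate_version(commits: dict[str, str]) -> list[int]:
--     # Closed-form over the message categories instead of a running state:
--     # major = 3 + #major-messages; minor = #minor-messages after the last major;
--     # patch = #messages after the last major-or-minor.
--     def cat(m):
--         k = m.strip().lower()[:6]
--         return k if k in ('major;', 'minor;') else 'other'
--     cats = [cat(m) for m in commits.values()]
--
--     def suffix_after_last(pred, lst):
--         for i in range(len(lst) - 1, -1, -1):
--             if pred(lst[i]):
--                 return lst[i + 1:]
--         return lst
--
--     maj_tail = suffix_after_last(lambda c: c == 'major;', cats)
--     min_tail = suffix_after_last(lambda c: c in ('major;', 'minor;'), cats)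
--     return [3 + cats.count('major;'), maj_tail.count('minor;'), len(min_tail)]
-- ===== Notes on version B (the rewrite author's own statement) =====
-- stated objective: alternative
-- what changed: Replaces A's single fold over a mutable [major,minor,patch] state with a closed-form computation over the per-message categories: major = 3 + count of 'major;' messages, minor = count of 'minor;' messages after the last 'major;', patch = number of messages after the last 'major;'-or-'minor;'.
import Mathlib
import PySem

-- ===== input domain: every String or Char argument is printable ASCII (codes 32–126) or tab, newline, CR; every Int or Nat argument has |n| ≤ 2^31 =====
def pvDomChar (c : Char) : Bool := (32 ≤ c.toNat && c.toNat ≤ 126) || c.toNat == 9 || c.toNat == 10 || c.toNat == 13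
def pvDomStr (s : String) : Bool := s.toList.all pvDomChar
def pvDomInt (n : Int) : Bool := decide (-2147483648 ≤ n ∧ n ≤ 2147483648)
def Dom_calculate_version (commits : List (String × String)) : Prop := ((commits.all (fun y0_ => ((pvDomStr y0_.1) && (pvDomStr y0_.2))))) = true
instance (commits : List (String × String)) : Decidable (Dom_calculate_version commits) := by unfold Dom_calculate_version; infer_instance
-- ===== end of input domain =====

-- B replaces A's running [major,minor,patch] state with a closed form over the per-message
-- categories (counts and suffixes after the last major / major-or-minor message); objective: alternative.

-- ===== PORT A =====
def pvBASE_VERSION : String := "3.0.0" ++ "-dev"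

-- message.strip().lower()[:6]
def pvKey (message : String) : String :=
  PySem.Str.slice (PySem.Str.lower (PySem.Str.strip message)) none (some 6)

-- the loop body; version always has length 3, so the pyGet? lookups never miss (getD 0 is never taken)
def pvStep (version : List Int) (message : String) : List Int :=
  let k := pvKey message
  if k = "major;" then
    [(PySem.List.pyGet? version (0:Int)).getD 0 + 1, 0, 0]
  else if k = "minor;" then
    [(PySem.List.pyGet? version (0:Int)).getD 0, (PySem.List.pyGet? version (1:Int)).getD 0 + 1, 0]
  else
    version.set 2 ((PySem.List.pyGet? version (2:Int)).getD 0 + 1)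

-- split('-') and split('.') have nonempty separators so split? is some; BASE_VERSION.split('-')[0]
-- exists and every piece is an int, so the getD defaults are never taken
def calculate_version (commits : List (String × String)) : List Int :=
  let version : List Int :=
    (((PySem.Str.split? ((PySem.List.pyGet? ((PySem.Str.split? pvBASE_VERSION "-").getD []) (0:Int)).getD "") ".").getD []).map
      (fun s => (PySem.Int.ofStr? s).getD 0))
  (commits.map Prod.snd).foldl pvStep version

-- ===== PORT B =====
-- m.strip().lower()[:6], B's own copy of the key computation
def pvKeyB (m : String) : String :=
  PySem.Str.slice (PySem.Str.lower (PySem.Str.strip m)) none (some 6)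

def pvCat (m : String) : String :=
  let k := pvKeyB m
  if k = "major;" ∨ k = "minor;" then k else "other"

-- suffix of lst strictly after the last element satisfying pred (whole list if none)
def pvSuffixAfterLast (pred : String → Bool) : List String → List String
  | [] => []
  | c :: rest =>
    if rest.any pred then pvSuffixAfterLast pred rest
    else if pred c then rest
    else c :: rest

def calculate_version_alt (commits : List (String × String)) : List Int :=
  let cats := (commits.map Prod.snd).map pvCat
  let majTail := pvSuffixAfterLast (fun c => c == "major;") cats
  let minTail := pvSuffixAfterLast (fun c => c == "major;" || c == "minor;") cats
  [3 + (cats.count "major;" : Int), (majTail.count "minor;" : Int), (minTail.length : Int)]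

-- ===== PRECONDITION & SPEC =====
def Spec_calculate_version (commits : List (String × String)) (out : List Int) : Prop := out = calculate_version_alt commits
instance (commits : List (String × String)) (out : List Int) : Decidable (Spec_calculate_version commits out) := by unfold Spec_calculate_version; infer_instance

-- ===== CLAIM (what is proved, stated in full; the proofs are below) =====
def Claim_equal_calculate_version : Prop := ∀ (commits : List (String × String)), Dom_calculate_version commits → Spec_calculate_version commits (calculate_version commits)

-- ===== LEMMAS AND PROOFS =====

-- B's core value on a list of messages
def pvAltCore (ms : List String) : List Int :=
  let cats := ms.map pvCat
  [3 + (cats.count "major;" : Int),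
   ((pvSuffixAfterLast (fun c => c == "major;") cats).count "minor;" : Int),
   ((pvSuffixAfterLast (fun c => c == "major;" || c == "minor;") cats).length : Int)]

theorem pvSuffixAfterLast_snoc (pred : String → Bool) (l : List String) (c : String) :
    pvSuffixAfterLast pred (l ++ [c]) =
      if pred c then [] else pvSuffixAfterLast pred l ++ [c] := by
  induction l with
  | nil => by_cases h : pred c <;> simp [pvSuffixAfterLast, h]
  | cons a l ih =>
    by_cases hc : pred c
    · simp [pvSuffixAfterLast, hc, ih]
    · by_cases hl : l.any pred
      · simp [pvSuffixAfterLast, hc, hl, ih]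
      · by_cases ha : pred a <;> simp [pvSuffixAfterLast, hc, hl, ha]

theorem pvAltCore_snoc (ms : List String) (m : String) :
    pvAltCore (ms ++ [m]) = pvStep (pvAltCore ms) m := by
  unfold pvAltCore pvStep
  rw [List.map_append]
  have hbk : pvKeyB m = pvKey m := rfl
  by_cases h1 : pvKey m = "major;"
  · have hc : pvCat m = "major;" := by simp [pvCat, hbk, h1]
    simp [hc, h1, pvSuffixAfterLast_snoc, List.count_append]
    ring
  · by_cases h2 : pvKey m = "minor;"
    · have hc : pvCat m = "minor;" := by simp [pvCat, hbk, h2]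
      simp [hc, h2, pvSuffixAfterLast_snoc, List.count_append]
    · have hc : pvCat m = "other" := by simp [pvCat, hbk, h1, h2]
      simp [hc, h1, h2, pvSuffixAfterLast_snoc, List.count_append, List.set]

theorem pvMain (ms : List String) : ms.foldl pvStep [3, 0, 0] = pvAltCore ms := by
  induction ms using List.reverseRecOn with
  | nil => rfl
  | append_singleton ms m ih => simp [List.foldl_append, ih, pvAltCore_snoc]

theorem pvInit :
    (((PySem.Str.split? ((PySem.List.pyGet? ((PySem.Str.split? pvBASE_VERSION "-").getD []) (0:Int)).getD "") ".").getD []).map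
      (fun s => (PySem.Int.ofStr? s).getD 0)) = [3, 0, 0] := by decide

-- ===== VERDICT (by name: the statement is the Claim_ definition above) =====
theorem calculate_version_spec : Claim_equal_calculate_version := by
  intro commits _
  show calculate_version commits = calculate_version_alt commits
  unfold calculate_version calculate_version_alt
  rw [pvInit, pvMain]
  rfl
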